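-- pv_equiv track=rewrite | github.com/danex474/GeneratorPy | main.py | calculate_15
-- ===== SOURCE A (Python) =====
-- def calculate_15(P_start, P_end, Q_start, Q_end):
--     #Решаем задачу по данной формуле
--     for A_start in range(P_start, P_end + 1):
--         for A_end in range(A_start, P_end + 1):
--             A = (A_start, A_end)
--             valid = True
--             # Заранее ограничим область x 1000
--             for x in range(1000):
--                 if P_start <= x <= P_end:
--                     if Q_start <= x <= Q_end and not (A[0] <= x <= A[1]) and P_start <= x <= P_end:
--                         valid = False
--                         break
--             if valid:
--                 return A
--     return None
-- ===== SOURCE B (Python) =====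
-- def calculate_15(P_start, P_end, Q_start, Q_end):
--     # Closed form: A scans candidate intervals; the first valid one is
--     # (P_start, hi) where hi is the upper bound of P∩Q∩[0,999], or
--     # (P_start, P_start) when that intersection is empty.
--     if P_start > P_end:
--         return None
--     hi = min(999, P_end, Q_end)
--     if hi < max(0, P_start, Q_start):
--         return (P_start, P_start)
--     return (P_start, hi)
-- ===== Notes on version B (the rewrite author's own statement) =====
-- stated objective: simpler
-- what changed: Replaces the triple nested scan (all candidate intervals, each checked against 1000 x-values) by a closed-form computation of the intersection bounds of P, Q and [0,999], returning (P_start, hi) directly.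
import Mathlib
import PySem

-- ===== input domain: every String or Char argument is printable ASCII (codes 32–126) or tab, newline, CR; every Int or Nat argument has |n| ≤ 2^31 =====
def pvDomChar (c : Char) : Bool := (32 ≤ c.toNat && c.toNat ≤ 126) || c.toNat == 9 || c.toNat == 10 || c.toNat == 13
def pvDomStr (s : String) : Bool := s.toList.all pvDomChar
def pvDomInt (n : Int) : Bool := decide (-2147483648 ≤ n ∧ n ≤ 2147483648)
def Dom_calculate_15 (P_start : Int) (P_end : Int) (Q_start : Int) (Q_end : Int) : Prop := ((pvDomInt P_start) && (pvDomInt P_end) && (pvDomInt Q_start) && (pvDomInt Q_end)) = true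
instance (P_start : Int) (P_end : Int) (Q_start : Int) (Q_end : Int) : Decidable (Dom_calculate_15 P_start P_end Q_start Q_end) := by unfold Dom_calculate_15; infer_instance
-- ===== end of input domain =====

-- B replaces A's triple nested scan by a closed-form O(1) computation of the
-- intersection bounds of P, Q and [0,999]; proved equal on all inputs.


-- ===== PORT A =====
-- the constant list(range(1000)) the x-loop iterates over (hoisted: it never changes)
def pvXs : List Int := PySem.List.pyRange 0 1000 1

-- inner 'for x in range(1000)' loop computing 'valid' (break = return false)
def pvValidGo (Ps Pe Qs Qe As Ae : Int) : List Int → Bool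
  | [] => true
  | x :: rest =>
    if Ps ≤ x ∧ x ≤ Pe then
      if (Qs ≤ x ∧ x ≤ Qe) ∧ ¬(As ≤ x ∧ x ≤ Ae) ∧ (Ps ≤ x ∧ x ≤ Pe) then false
      else pvValidGo Ps Pe Qs Qe As Ae rest
    else pvValidGo Ps Pe Qs Qe As Ae rest

-- 'for A_end in range(A_start, P_end + 1)' loop with the early return;
-- the range is consumed lazily (counter + remaining-iterations fuel), as Python's range is
def pvInner (Ps Pe Qs Qe As : Int) : Nat → Int → Option (List Int)
  | 0, _ => none
  | n + 1, Ae =>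
    if pvValidGo Ps Pe Qs Qe As Ae pvXs then some [As, Ae]
    else pvInner Ps Pe Qs Qe As n (Ae + 1)

-- 'for A_start in range(P_start, P_end + 1)' loop, same lazy-range shape
def pvOuter (Ps Pe Qs Qe : Int) : Nat → Int → Option (List Int)
  | 0, _ => none
  | n + 1, As =>
    match pvInner Ps Pe Qs Qe As (Pe + 1 - As).toNat As with
    | some r => some r
    | none => pvOuter Ps Pe Qs Qe n (As + 1)

def calculate_15 (P_start : Int) (P_end : Int) (Q_start : Int) (Q_end : Int) : Option (List Int) :=
  pvOuter P_start P_end Q_start Q_end (P_end + 1 - P_start).toNat P_start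

-- ===== PORT B =====
def calculate_15_alt (P_start : Int) (P_end : Int) (Q_start : Int) (Q_end : Int) : Option (List Int) :=
  if P_end < P_start then none
  else
    let hi := min 999 (min P_end Q_end)
    if hi < max 0 (max P_start Q_start) then some [P_start, P_start]
    else some [P_start, hi]

-- ===== PRECONDITION & SPEC =====
def Spec_calculate_15 (P_start : Int) (P_end : Int) (Q_start : Int) (Q_end : Int) (out : Option (List Int)) : Prop := out = calculate_15_alt P_start P_end Q_start Q_end
instance (P_start : Int) (P_end : Int) (Q_start : Int) (Q_end : Int) (out : Option (List Int)) : Decidable (Spec_calculate_15 P_start P_end Q_start Q_end out) := by unfold Spec_calculate_15; infer_instance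

-- ===== CLAIM (what is proved, stated in full; the proofs are below) =====
def Claim_equal_calculate_15 : Prop := ∀ (P_start : Int) (P_end : Int) (Q_start : Int) (Q_end : Int), Dom_calculate_15 P_start P_end Q_start Q_end → Spec_calculate_15 P_start P_end Q_start Q_end (calculate_15 P_start P_end Q_start Q_end)

-- ===== LEMMAS AND PROOFS =====

-- the inner 1000-loop over any list is an 'all' statement
theorem pvValidGo_iff (Ps Pe Qs Qe As Ae : Int) (xs : List Int) :
    pvValidGo Ps Pe Qs Qe As Ae xs = true ↔
      ∀ x ∈ xs, Ps ≤ x → x ≤ Pe → Qs ≤ x → x ≤ Qe → (As ≤ x ∧ x ≤ Ae) := by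
  induction xs with
  | nil => simp [pvValidGo]
  | cons x rest ih =>
    simp only [pvValidGo, List.mem_cons]
    split_ifs with h1 h2 <;> constructor <;> intro h
    · simp at h
    · exact absurd (h x (Or.inl rfl) h1.1 h1.2 h2.1.1 h2.1.2) h2.2.1
    · rintro y (rfl | hy) hy1 hy2 hy3 hy4
      · by_contra hc; exact h2 ⟨⟨hy3, hy4⟩, hc, hy1, hy2⟩
      · exact (ih.mp h) y hy hy1 hy2 hy3 hy4
    · exact ih.mpr (fun y hy => h y (Or.inr hy))
    · rintro y (rfl | hy) hy1 hy2 hy3 hy4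
      · exact absurd ⟨hy1, hy2⟩ h1
      · exact (ih.mp h) y hy hy1 hy2 hy3 hy4
    · exact ih.mpr (fun y hy => h y (Or.inr hy))

-- over range(1000) it becomes a bounded quantifier
theorem pvValid_iff (Ps Pe Qs Qe As Ae : Int) :
    pvValidGo Ps Pe Qs Qe As Ae pvXs = true ↔
      ∀ x : Int, 0 ≤ x → x < 1000 → Ps ≤ x → x ≤ Pe → Qs ≤ x → x ≤ Qe → (As ≤ x ∧ x ≤ Ae) := by
  unfold pvXs
  rw [pvValidGo_iff]
  constructor
  · intro h x h0 h1
    exact h x (PySem.List.mem_pyRange_one.mpr ⟨h0, by exact_mod_cast h1⟩)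
  · intro h x hx
    have := PySem.List.mem_pyRange_one.mp hx
    exact h x this.1 (by exact_mod_cast this.2)

-- in the nonempty-intersection case, the inner loop starting at a ≤ hi returns (Ps, hi)
theorem pvInner_finds (Ps Pe Qs Qe hi : Int)
    (hhi : hi = min 999 (min Pe Qe)) (hlo : max 0 (max Ps Qs) ≤ hi) :
    ∀ (fuel : Nat) (a : Int), a ≤ hi → hi - a < (fuel : Int) →
      pvInner Ps Pe Qs Qe Ps fuel a = some [Ps, hi] := by
  intro fuel
  induction fuel with
  | zero => intro a ha hf; simp at hf; omega
  | succ n ih =>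
    intro a ha hf
    by_cases heq : a = hi
    · subst heq
      simp only [pvInner]
      rw [if_pos]
      rw [pvValid_iff]
      intro x h0 h1 h2 h3 h4 h5
      omega
    · simp only [pvInner]
      rw [if_neg, ih (a + 1) (by omega) (by push_cast; omega)]
      rw [pvValid_iff]
      push_neg
      exact ⟨hi, by omega, by omega, by omega, by omega, by omega, by omega, by omega⟩

-- ===== VERDICT (by name: the statement is the Claim_ definition above) =====
theorem calculate_15_spec : Claim_equal_calculate_15 := by
  intro Ps Pe Qs Qe _
  unfold Spec_calculate_15 calculate_15 calculate_15_alt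
  by_cases hP : Pe < Ps
  · rw [show (Pe + 1 - Ps).toNat = 0 by omega, if_pos hP]
    rfl
  · push_neg at hP
    rw [if_neg (by omega)]
    rw [show (Pe + 1 - Ps).toNat = (Pe - Ps).toNat + 1 by omega]
    by_cases hlh : min 999 (min Pe Qe) < max 0 (max Ps Qs)
    · -- empty intersection with [0,999]: first candidate (Ps, Ps) is valid
      simp only [pvOuter]
      rw [show (Pe + 1 - Ps).toNat = (Pe - Ps).toNat + 1 by omega]
      simp only [pvInner]
      rw [if_pos, if_pos hlh]
      rw [pvValid_iff]
      intro x h0 h1 h2 h3 h4 h5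
      omega
    · push_neg at hlh
      rw [if_neg (by omega)]
      simp only [pvOuter]
      rw [pvInner_finds Ps Pe Qs Qe (min 999 (min Pe Qe)) rfl hlh
        (Pe + 1 - Ps).toNat Ps (by omega) (by push_cast; omega)]
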